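-- pv_equiv track=rewrite | github.com/hswek/algorithm | 프로그래머스/3/70130. 스타 수열/스타 수열.py | is_star
-- ===== SOURCE A (Python) =====
-- def is_star(arr):
--     tmp=[]
--     if len(arr)%2!=0:
--         return False
--     for i in range(len(arr)//2):
--         if arr[2*i]==arr[2*i+1]:
--
--             return False
--         tmp.append({arr[2*i],arr[2*i+1]})
--     s=tmp[0]
--     for t in tmp:
--         s=s&t
--     if len(s)==0:
--         return False
--     return True
-- ===== SOURCE B (Python) =====
-- def is_star(arr):
--     if len(arr) % 2 != 0:
--         return False
--     pairs = [(arr[i], arr[i + 1]) for i in range(0, len(arr), 2)]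
--     c1, c2 = arr[0], arr[1]
--     if any(a == b for a, b in pairs):
--         return False
--     return any(all(c == a or c == b for a, b in pairs) for c in (c1, c2))
-- ===== Notes on version B (the rewrite author's own statement) =====
-- stated objective: faster
-- what changed: Replaces A's running set-intersection over per-pair sets with a candidate-and-verify scan: the two elements of the first pair are the only possible common values, and each is checked against every pair with an all() scan.
import Mathlib
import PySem

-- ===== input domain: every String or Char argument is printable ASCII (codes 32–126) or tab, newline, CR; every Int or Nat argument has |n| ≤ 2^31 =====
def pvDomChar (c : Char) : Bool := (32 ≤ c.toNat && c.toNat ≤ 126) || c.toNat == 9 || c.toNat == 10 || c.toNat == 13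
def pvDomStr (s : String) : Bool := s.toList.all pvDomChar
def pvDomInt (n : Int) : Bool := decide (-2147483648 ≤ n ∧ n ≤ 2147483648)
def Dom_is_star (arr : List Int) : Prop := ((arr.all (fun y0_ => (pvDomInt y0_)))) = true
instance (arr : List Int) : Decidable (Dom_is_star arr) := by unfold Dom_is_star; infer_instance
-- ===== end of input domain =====

-- B replaces the running set-intersection with a candidate-and-verify scan over the pairs (alternative decomposition).

-- ===== PORT A =====
-- the loop 'for i in range(len(arr)//2): …' consuming arr two elements at a time, carrying tmp
def aLoop (l : List Int) (tmp : List (PySem.Set Int)) : Option (List (PySem.Set Int)) :=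
  match l with
  | a :: b :: rest =>
      if a == b then none
      else aLoop rest (tmp ++ [PySem.Set.ofList [a, b]])
  | _ => some tmp

def is_star (arr : List Int) : Bool :=
  if arr.length % 2 ≠ 0 then false
  else
    match aLoop arr [] with
    | none => false
    | some tmp =>
      match tmp with
      | [] => false   -- Python raises IndexError at tmp[0] here; excluded by Pre_is_star
      | s0 :: _ =>
        let s := tmp.foldl (fun s t => PySem.Set.inter s t) s0
        if PySem.Set.len s == 0 then false else true

-- ===== PORT B =====
-- pairs = [(arr[i], arr[i+1]) for i in range(0, len(arr), 2)] on an even-length list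
def pairsOf (l : List Int) : List (Int × Int) :=
  match l with
  | a :: b :: rest => (a, b) :: pairsOf rest
  | _ => []

def is_star_alt (arr : List Int) : Bool :=
  if arr.length % 2 ≠ 0 then false
  else
    match arr with
    | [] => false    -- Python raises IndexError at arr[0] here; excluded by Pre_is_star
    | [_] => false   -- unreachable: length is even
    | c1 :: c2 :: _ =>
      let pairs := pairsOf arr
      if pairs.any (fun p => p.1 == p.2) then false
      else [c1, c2].any (fun c => pairs.all (fun p => c == p.1 || c == p.2))

-- ===== PRECONDITION & SPEC =====
-- Pre_ excludes the empty list, on which both Pythons raise IndexError (A at tmp[0], B at arr[0]).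
def Pre_is_star (arr : List Int) : Prop := arr ≠ []
instance (arr : List Int) : Decidable (Pre_is_star arr) := by unfold Pre_is_star; infer_instance
def pvWitness_is_star : List Int := [1, 2, 1, 3]

def Spec_is_star (arr : List Int) (out : Bool) : Prop := out = is_star_alt arr
instance (arr : List Int) (out : Bool) : Decidable (Spec_is_star arr out) := by unfold Spec_is_star; infer_instance

-- ===== CLAIM (what is proved, stated in full; the proofs are below) =====
def Claim_equal_is_star : Prop := ∀ (arr : List Int), Dom_is_star arr → Pre_is_star arr → Spec_is_star arr (is_star arr)

-- ===== LEMMAS AND PROOFS =====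

-- A's loop computes: none if some pair is equal, else the list of per-pair sets appended to tmp.
theorem aLoop_eq : ∀ (l : List Int) (tmp : List (PySem.Set Int)),
    aLoop l tmp = if (pairsOf l).any (fun p => p.1 == p.2) then none
                  else some (tmp ++ (pairsOf l).map (fun p => PySem.Set.ofList [p.1, p.2]))
  | [], tmp => by simp [aLoop, pairsOf]
  | [x], tmp => by simp [aLoop, pairsOf]
  | a :: b :: rest, tmp => by
      rw [show pairsOf (a :: b :: rest) = (a, b) :: pairsOf rest from rfl]
      simp only [aLoop, List.any_cons]
      by_cases h : a = b
      · simp [h]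
      · rw [aLoop_eq rest]
        by_cases h2 : ((pairsOf rest).any (fun p => p.1 == p.2)) = true
        · simp [h, h2]
        · simp only [Bool.not_eq_true] at h2
          simp [h, h2, List.append_assoc]

theorem mem_foldl_inter : ∀ (x : Int) (l : List (PySem.Set Int)) (s : PySem.Set Int),
    x ∈ l.foldl (fun s t => PySem.Set.inter s t) s ↔ x ∈ s ∧ ∀ t ∈ l, x ∈ t
  | x, [], s => by simp
  | x, t :: l, s => by
      rw [List.foldl_cons, mem_foldl_inter x l (PySem.Set.inter s t)]
      rw [PySem.Set.mem_inter]
      constructor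
      · rintro ⟨⟨hs, ht⟩, hl⟩
        exact ⟨hs, fun u hu => (List.mem_cons.mp hu).elim (fun h => h ▸ ht) (hl u)⟩
      · rintro ⟨hs, hl⟩
        exact ⟨⟨hs, hl t (List.mem_cons_self ..)⟩, fun u hu => hl u (List.mem_cons_of_mem _ hu)⟩

-- ===== VERDICT (by name: the statement is the Claim_ definition above) =====
theorem is_star_spec : Claim_equal_is_star := by
  intro arr _ hpre
  unfold Spec_is_star is_star is_star_alt
  by_cases hodd : arr.length % 2 ≠ 0
  · rw [if_pos hodd, if_pos hodd]
  · rw [if_neg hodd, if_neg hodd]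
    match arr, hpre with
    | [], h => exact absurd rfl h
    | [c], _ => exact absurd (by simp) hodd
    | c1 :: c2 :: rest, _ =>
      rw [aLoop_eq]
      by_cases heq : ((pairsOf (c1 :: c2 :: rest)).any (fun p => p.1 == p.2)) = true
      · simp [heq]
      · rw [if_neg heq]
        show (if ((List.foldl (fun s t => PySem.Set.inter s t) (PySem.Set.ofList [c1, c2])
                (PySem.Set.ofList [c1, c2] ::
                  (pairsOf rest).map (fun p => PySem.Set.ofList [p.1, p.2]))).len == 0) = true
              then false else true)
            = (if (((c1, c2) :: pairsOf rest).any fun p => p.1 == p.2) = true then false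
               else [c1, c2].any fun c => ((c1, c2) :: pairsOf rest).all fun p => c == p.1 || c == p.2)
        have heq' : ¬ (((c1, c2) :: pairsOf rest).any fun p => p.1 == p.2) = true := heq
        rw [if_neg heq']
        set S := List.foldl (fun s t => PySem.Set.inter s t) (PySem.Set.ofList [c1, c2])
          (PySem.Set.ofList [c1, c2] :: (pairsOf rest).map (fun p => PySem.Set.ofList [p.1, p.2]))
          with hS
        have hmemS : ∀ x : Int, x ∈ S ↔ (x = c1 ∨ x = c2) ∧
            ∀ p ∈ (c1, c2) :: pairsOf rest, x = p.1 ∨ x = p.2 := by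
          intro x
          rw [hS, mem_foldl_inter]
          constructor
          · rintro ⟨hx0, hall⟩
            refine ⟨by simpa using (PySem.Set.mem_ofList ..).mp hx0, ?_⟩
            intro p hp'
            rcases List.mem_cons.mp hp' with h1 | h1
            · subst h1; simpa using (PySem.Set.mem_ofList ..).mp hx0
            · have := hall _ (List.mem_cons_of_mem _ (List.mem_map.mpr ⟨p, h1, rfl⟩))
              simpa using (PySem.Set.mem_ofList ..).mp this
          · rintro ⟨hx0, hall⟩
            refine ⟨(PySem.Set.mem_ofList ..).mpr (by simpa using hx0), ?_⟩
            intro t ht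
            rcases List.mem_cons.mp ht with h1 | h1
            · subst h1; exact (PySem.Set.mem_ofList ..).mpr (by simpa using hx0)
            · obtain ⟨p, hp1, rfl⟩ := List.mem_map.mp h1
              exact (PySem.Set.mem_ofList ..).mpr
                (by simpa using hall p (List.mem_cons_of_mem _ hp1))
        rw [Bool.eq_iff_iff]
        constructor
        · intro h
          split_ifs at h with hl
          have hne : S ≠ [] := by
            intro hnil
            apply hl
            rw [hnil]
            rfl
          obtain ⟨x, hx⟩ := List.exists_mem_of_ne_nil _ hne
          obtain ⟨hx0, hall⟩ := (hmemS x).mp hx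
          simp only [List.any_eq_true, List.mem_cons, List.all_eq_true, List.not_mem_nil,
            or_false, Bool.or_eq_true, beq_iff_eq]
          exact ⟨x, hx0, fun p hp' => hall p (List.mem_cons.mpr hp')⟩
        · intro h
          simp only [List.any_eq_true, List.mem_cons, List.all_eq_true, List.not_mem_nil,
            or_false, Bool.or_eq_true, beq_iff_eq] at h
          obtain ⟨c, hc, hall⟩ := h
          have hcS : c ∈ S := (hmemS c).mpr ⟨hc, fun p hp' => hall p (List.mem_cons.mp hp')⟩
          rw [if_neg]
          intro hl
          have hnil : S = [] := by
            have : S.length = 0 := by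
              have := (beq_iff_eq).mp hl
              simpa [PySem.Set.len] using this
            exact List.length_eq_zero_iff.mp this
          rw [hnil] at hcS
          simp at hcS
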